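-- pv_equiv track=rewrite | github.com/djyaron/DFTBML | MasterPackage/DFTBrepulsive/util.py | formatZ
-- ===== SOURCE A (Python) =====
-- from typing import Optional, Iterable
--
-- def formatZ(Zs: Iterable, unique: bool = True, ordered: bool = False) -> tuple:
--     r"""Convert Zs to a sorted tuple of tuples
--
--     Args:
--         Zs: Iterable
--         unique: bool
--             Remove duplicated Zs
--         ordered: bool
--             Sort each Z tuple when set to False.
--             For integral tables: set to True
--             For repulsive potentials: set to False
--
--     Returns:
--         tuple
--
--     """
--     if ordered:
--         _Zs = tuple(tuple(Z) for Z in Zs)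
--     else:
--         _Zs = tuple(tuple(sorted(Z)) for Z in Zs)
--     if unique:
--         _Zs = tuple(set(Z for Z in _Zs))
--     return tuple(sorted(Z for Z in _Zs))
-- ===== SOURCE B (Python) =====
-- def formatZ(Zs, unique=True, ordered=False):
--     # Normalize exactly as A does, then ONE sort of the whole list;
--     # dedup (if requested) by collapsing adjacent equal tuples in a linear pass
--     # instead of A's hash-set-then-sort.
--     if ordered:
--         norm = [tuple(Z) for Z in Zs]
--     else:
--         norm = [tuple(sorted(Z)) for Z in Zs]
--     norm.sort()
--     if not unique:
--         return tuple(norm)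
--     out = []
--     for z in norm:
--         if not out or out[-1] != z:
--             out.append(z)
--     return tuple(out)
-- ===== Notes on version B (the rewrite author's own statement) =====
-- stated objective: alternative
-- what changed: A dedupes with a hash set and then sorts the deduped tuples; B sorts the normalized list once and, when unique, removes duplicates in a single linear pass over adjacent equal elements.
import Mathlib
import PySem

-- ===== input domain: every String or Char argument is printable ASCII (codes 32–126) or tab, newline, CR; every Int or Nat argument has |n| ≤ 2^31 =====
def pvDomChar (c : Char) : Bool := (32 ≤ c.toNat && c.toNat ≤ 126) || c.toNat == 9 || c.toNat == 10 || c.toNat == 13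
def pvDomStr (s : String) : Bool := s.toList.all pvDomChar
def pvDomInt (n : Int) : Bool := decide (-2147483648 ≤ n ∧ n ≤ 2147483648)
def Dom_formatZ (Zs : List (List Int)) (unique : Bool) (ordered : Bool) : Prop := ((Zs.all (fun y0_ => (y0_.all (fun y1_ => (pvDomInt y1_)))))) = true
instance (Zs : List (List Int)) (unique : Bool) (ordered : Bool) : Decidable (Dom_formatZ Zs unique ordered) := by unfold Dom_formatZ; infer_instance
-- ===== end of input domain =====

-- B replaces A's hash-set dedup followed by a sort with one sort of the
-- normalized list followed by a linear adjacent-duplicate collapse (alternative decomposition).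


-- sorted(...) on tuples of ints: Python's lexicographic tuple order.
def sortLL (xs : List (List Int)) : List (List Int) :=
  @PySem.List.sorted (List Int) (List Int) List.instLinearOrder.toLT LinearOrder.toDecidableLT xs (fun x => x) false

-- ===== PORT A =====
def formatZ (Zs : List (List Int)) (unique : Bool) (ordered : Bool) : List (List Int) :=
  let zs1 := if ordered then Zs else Zs.map (fun Z => PySem.List.sorted Z (fun x => x) false)
  let zs2 := if unique then PySem.Set.ofList zs1 else zs1
  sortLL zs2

-- ===== PORT B =====
-- the 'for z in norm' loop of Source B: append z unless it equals the last element kept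
def dedupSorted (norm : List (List Int)) : List (List Int) :=
  norm.foldl (fun out z => if out.getLast? = some z then out else out ++ [z]) []

def formatZ_alt (Zs : List (List Int)) (unique : Bool) (ordered : Bool) : List (List Int) :=
  let norm := if ordered then Zs else Zs.map (fun Z => PySem.List.sorted Z (fun x => x) false)
  let sortedNorm := sortLL norm
  if unique then dedupSorted sortedNorm else sortedNorm

-- ===== PRECONDITION & SPEC =====
def Spec_formatZ (Zs : List (List Int)) (unique : Bool) (ordered : Bool) (out : List (List Int)) : Prop := out = formatZ_alt Zs unique ordered
instance (Zs : List (List Int)) (unique : Bool) (ordered : Bool) (out : List (List Int)) : Decidable (Spec_formatZ Zs unique ordered out) := by unfold Spec_formatZ; infer_instance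

-- ===== CLAIM (what is proved, stated in full; the proofs are below) =====
def Claim_equal_formatZ : Prop := ∀ (Zs : List (List Int)) (unique : Bool) (ordered : Bool), Dom_formatZ Zs unique ordered → Spec_formatZ Zs unique ordered (formatZ Zs unique ordered)

-- ===== LEMMAS AND PROOFS =====

-- the last element of a strictly increasing list is its maximum
theorem getLast?_of_max (acc : List (List Int)) (a : List Int)
    (hp : acc.Pairwise (· < ·)) (ha : a ∈ acc) (hmax : ∀ x ∈ acc, x ≤ a) :
    acc.getLast? = some a := by
  induction acc with
  | nil => cases ha
  | cons x t ih =>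
    cases t with
    | nil =>
      simp at ha; subst ha; rfl
    | cons y t' =>
      rw [List.getLast?_cons_cons]
      rcases List.pairwise_cons.mp hp with ⟨hx, hpt⟩
      rcases List.mem_cons.mp ha with rfl | ha'
      · exact absurd (hmax y (by simp)) (not_le.mpr (hx y (by simp)))
      · exact ih hpt ha' (fun x hx' => hmax x (List.mem_cons_of_mem _ hx'))

-- invariant of the adjacent-dedup fold on a ≤-sorted input
theorem dedup_fold_inv (l : List (List Int)) :
    ∀ acc : List (List Int), l.Pairwise (· ≤ ·) → acc.Pairwise (· < ·) →
    (∀ a ∈ acc, ∀ b ∈ l, a ≤ b) →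
    (l.foldl (fun out z => if out.getLast? = some z then out else out ++ [z]) acc).Pairwise (· < ·) ∧
    (∀ x, x ∈ l.foldl (fun out z => if out.getLast? = some z then out else out ++ [z]) acc ↔ x ∈ acc ∨ x ∈ l) := by
  induction l with
  | nil => intro acc _ hacc _; exact ⟨hacc, fun x => by simp⟩
  | cons z t ih =>
    intro acc hl hacc hle
    rcases List.pairwise_cons.mp hl with ⟨hzt, ht⟩
    rw [List.foldl_cons]
    by_cases h : acc.getLast? = some z
    · have hz : z ∈ acc := List.mem_of_getLast? h
      rw [if_pos h]
      obtain ⟨h1, h2⟩ := ih acc ht hacc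
        (fun a ha b hb => hle a ha b (List.mem_cons_of_mem _ hb))
      refine ⟨h1, fun x => ?_⟩
      rw [h2 x]
      constructor
      · rintro (hx | hx)
        · exact Or.inl hx
        · exact Or.inr (List.mem_cons_of_mem _ hx)
      · rintro (hx | hx)
        · exact Or.inl hx
        · rcases List.mem_cons.mp hx with rfl | hx'
          · exact Or.inl hz
          · exact Or.inr hx'
    · rw [if_neg h]
      have hltz : ∀ a ∈ acc, a < z := by
        intro a ha
        have hle' : a ≤ z := hle a ha z (by simp)
        rcases lt_or_eq_of_le hle' with hlt | rfl
        · exact hlt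
        · exact absurd (getLast?_of_max acc a hacc ha
            (fun x hx => hle x hx a (by simp))) h
      have hacc' : (acc ++ [z]).Pairwise (· < ·) := by
        rw [List.pairwise_append]
        exact ⟨hacc, List.pairwise_singleton _ _, fun a ha b hb => by
          simp at hb; subst hb; exact hltz a ha⟩
      have hle' : ∀ a ∈ acc ++ [z], ∀ b ∈ t, a ≤ b := by
        intro a ha b hb
        rcases List.mem_append.mp ha with ha' | ha'
        · exact hle a ha' b (List.mem_cons_of_mem _ hb)
        · simp at ha'; subst ha'; exact hzt b hb
      obtain ⟨h1, h2⟩ := ih (acc ++ [z]) ht hacc' hle'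
      refine ⟨h1, fun x => ?_⟩
      rw [h2 x]
      simp [List.mem_append, List.mem_cons]
      tauto

-- the core equality: sorted(set(xs)) = adjacent-dedup(sorted(xs))
theorem sorted_set_eq_dedup_sorted (xs : List (List Int)) :
    sortLL (PySem.Set.ofList xs) = dedupSorted (sortLL xs) := by
  have hsorted : (sortLL xs).Pairwise (· ≤ ·) := by
    simpa using PySem.List.sorted_pairwise (κ := List Int) xs (fun x => x)
  obtain ⟨hpair, hmem⟩ := dedup_fold_inv (sortLL xs) [] hsorted (by simp) (by simp)
  have hnodup : (dedupSorted (sortLL xs)).Nodup :=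
    hpair.imp (fun h => ne_of_lt h)
  have hperm : (dedupSorted (sortLL xs)).Perm (PySem.Set.ofList xs) := by
    rw [List.perm_ext_iff_of_nodup hnodup (PySem.Set.nodup_ofList xs)]
    intro a
    rw [show (dedupSorted (sortLL xs)) =
      (sortLL xs).foldl (fun out z => if out.getLast? = some z then out else out ++ [z]) [] from rfl]
    rw [hmem a, PySem.Set.mem_ofList]
    simp [sortLL, PySem.List.mem_sorted]
  exact PySem.List.sorted_eq_of_perm_of_pairwise_lt _ _ _ hperm (by simpa using hpair)

-- ===== VERDICT (by name: the statement is the Claim_ definition above) =====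
theorem formatZ_spec : Claim_equal_formatZ := by
  intro Zs unique ordered _
  unfold Spec_formatZ formatZ formatZ_alt
  cases unique with
  | false => simp
  | true => simp [sorted_set_eq_dedup_sorted]
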